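-- pv_equiv track=rewrite | github.com/calebjcourtney/advent-of-code | 2021/python/day06.py | part_one
-- ===== SOURCE A (Python) =====
-- class Fish:
--     def __init__(self, timer):
--         self.timer = timer
--
--     def add_day(self):
--         if self.timer == 0:
--             self.timer = 6
--
--         else:
--             self.timer -= 1
--
-- def part_one(data):
--     fish = []
--     for num in data:
--         f = Fish(num)
--         fish.append(f)
--
--     for _ in range(80):
--         new_fish = []
--         for f in fish:
--             if f.timer == 0:
--                 new_fish.append(Fish(8))
--
--             f.add_day()
--
--         fish += new_fish
--
--     return len(fish)
-- ===== SOURCE B (Python) =====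
-- def part_one(data):
--     # Closed-form per starting timer via memoized recursion: a fish with timer t
--     # contributes pop(t, 80) fish; O(len(data) + days) instead of simulating
--     # the exponentially growing population.
--     memo = {}
--
--     def pop(t, days):
--         if t < 0 or t >= days:
--             return 1
--         key = (t, days)
--         if key not in memo:
--             memo[key] = pop(6, days - t - 1) + pop(8, days - t - 1)
--         return memo[key]
--
--     return sum(pop(t, 80) for t in data)
-- ===== Notes on version B (the rewrite author's own statement) =====
-- stated objective: faster
-- what changed: Replaces the day-by-day simulation of an exponentially growing fish list with a memoized per-timer recurrence: each starting timer contributes pop(t,80) descendants, summed over the input.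
import Mathlib
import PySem

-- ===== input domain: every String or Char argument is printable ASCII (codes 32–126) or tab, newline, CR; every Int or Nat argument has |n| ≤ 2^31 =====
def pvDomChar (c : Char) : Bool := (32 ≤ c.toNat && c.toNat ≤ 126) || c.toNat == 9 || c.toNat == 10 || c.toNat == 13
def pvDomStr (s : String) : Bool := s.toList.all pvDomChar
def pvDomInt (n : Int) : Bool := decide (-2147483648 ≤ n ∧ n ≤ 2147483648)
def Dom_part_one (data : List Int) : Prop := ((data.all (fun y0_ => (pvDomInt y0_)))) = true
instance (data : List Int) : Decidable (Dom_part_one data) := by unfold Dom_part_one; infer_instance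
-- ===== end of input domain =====

-- B replaces A's day-by-day simulation of the growing fish list with a memoized
-- per-timer recurrence (sum of pop(t,80) over the input); objective: faster (asymptotic).

-- ===== PORT A =====
-- the fish list holds each Fish's timer; the inner day loop carries the pair
-- (mutated fish so far, new_fish so far), exactly as A's loop does.
def part_one (data : List Int) : Int :=
  let fish : List Int := data.foldl (fun acc num => acc ++ [num]) []
  let fish : List Int := (List.range 80).foldl (fun fish _ =>
      let p : List Int × List Int := fish.foldl (fun p t =>
          let new1 := if t = 0 then p.2 ++ [(8 : Int)] else p.2  -- new_fish.append(Fish(8))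
          let t' := if t = 0 then (6 : Int) else t - 1           -- f.add_day()
          (p.1 ++ [t'], new1)) ([], [])
      p.1 ++ p.2) fish
  (fish.length : Int)

-- ===== PORT B =====
def pop (t : Int) (days : Nat) : Int :=
  if t < 0 ∨ (days : Int) ≤ t then 1
  else pop 6 (days - t.toNat - 1) + pop 8 (days - t.toNat - 1)
termination_by days
decreasing_by
  all_goals
    rename_i h
    push_neg at h
    omega

def part_one_alt (data : List Int) : Int :=
  data.foldl (fun acc t => acc + pop t 80) 0

-- ===== PRECONDITION & SPEC =====
def Spec_part_one (data : List Int) (out : Int) : Prop := out = part_one_alt data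
instance (data : List Int) (out : Int) : Decidable (Spec_part_one data out) := by unfold Spec_part_one; infer_instance

-- ===== CLAIM (what is proved, stated in full; the proofs are below) =====
def Claim_equal_part_one : Prop := ∀ (data : List Int), Dom_part_one data → Spec_part_one data (part_one data)

-- ===== LEMMAS AND PROOFS =====

-- one day of A's simulation, as map ++ flatMap
def dayA (fish : List Int) : List Int :=
  fish.map (fun t => if t = 0 then (6 : Int) else t - 1)
    ++ fish.flatMap (fun t => if t = 0 then [(8 : Int)] else [])

-- d days of A's simulation
def simd : Nat → List Int → List Int
  | 0, fish => fish
  | d + 1, fish => dayA (simd d fish)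

theorem build_eq (data acc : List Int) :
    data.foldl (fun acc num => acc ++ [num]) acc = acc ++ data := by
  induction data generalizing acc with
  | nil => simp
  | cons x xs ih => simp [ih]

theorem inner_eq (fish a b : List Int) :
    fish.foldl (fun p t =>
        let new1 := if t = 0 then p.2 ++ [(8 : Int)] else p.2
        let t' := if t = 0 then (6 : Int) else t - 1
        (p.1 ++ [t'], new1)) (a, b)
    = (a ++ fish.map (fun t => if t = 0 then (6 : Int) else t - 1),
       b ++ fish.flatMap (fun t => if t = 0 then [(8 : Int)] else [])) := by
  induction fish generalizing a b with
  | nil => simp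
  | cons x xs ih => by_cases hx : x = 0 <;> simp [hx, ih]

theorem range_sim (d : Nat) (fish : List Int) :
    (List.range d).foldl (fun fish _ =>
        let p : List Int × List Int := fish.foldl (fun p t =>
            let new1 := if t = 0 then p.2 ++ [(8 : Int)] else p.2
            let t' := if t = 0 then (6 : Int) else t - 1
            (p.1 ++ [t'], new1)) ([], [])
        p.1 ++ p.2) fish = simd d fish := by
  induction d with
  | zero => simp [simd]
  | succ d ih =>
      rw [List.range_succ, List.foldl_append, ih]
      simp [inner_eq, simd, dayA]

theorem dayA_perm {xs ys : List Int} (h : xs.Perm ys) : (dayA xs).Perm (dayA ys) :=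
  (h.map _).append (h.flatMap (fun _ _ => List.Perm.refl _))

theorem dayA_append (xs ys : List Int) :
    (dayA (xs ++ ys)).Perm (dayA xs ++ dayA ys) := by
  unfold dayA
  simp only [List.map_append, List.flatMap_append, List.append_assoc]
  exact (List.perm_append_comm_assoc _ _ _).append_left _

theorem simd_append (d : Nat) (xs ys : List Int) :
    (simd d (xs ++ ys)).Perm (simd d xs ++ simd d ys) := by
  induction d with
  | zero => exact List.Perm.refl _
  | succ d ih => exact (dayA_perm ih).trans (dayA_append _ _)

theorem len_append (d : Nat) (xs ys : List Int) :
    (simd d (xs ++ ys)).length = (simd d xs).length + (simd d ys).length := by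
  rw [(simd_append d xs ys).length_eq, List.length_append]

theorem simd_add (a b : Nat) (fish : List Int) :
    simd (a + b) fish = simd a (simd b fish) := by
  induction a with
  | zero => simp [simd]
  | succ a ih =>
      have hrw : a + 1 + b = (a + b) + 1 := by omega
      rw [hrw]
      show dayA (simd (a + b) fish) = dayA (simd a (simd b fish))
      rw [ih]

-- a fish that never reaches 0 within d days just counts down
theorem countdown (d : Nat) (t : Int) (h : t < 0 ∨ (d : Int) ≤ t) :
    simd d [t] = [t - d] := by
  induction d with
  | zero => simp [simd]
  | succ d ih =>
      have h' : t < 0 ∨ (d : Int) ≤ t := by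
        rcases h with h | h
        · exact Or.inl h
        · right; omega
      have hne : t - (d : Int) ≠ 0 := by
        rcases h with h | h <;> omega
      have hstep : simd (d + 1) [t] = dayA (simd d [t]) := rfl
      rw [hstep, ih h']
      simp only [dayA, List.map_cons, List.map_nil, List.flatMap_cons, List.flatMap_nil,
        if_neg hne, List.append_nil]
      congr 1
      push_cast
      ring

-- the population after d days of one fish with timer t equals B's pop
theorem single_pop (d : Nat) : ∀ t : Int, ((simd d [t]).length : Int) = pop t d := by
  induction d using Nat.strong_induction_on with
  | _ d ih =>
    intro t
    rw [pop]
    by_cases h : t < 0 ∨ (d : Int) ≤ t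
    · rw [if_pos h, countdown d t h]; rfl
    · rw [if_neg h]
      push_neg at h
      obtain ⟨h0, hd⟩ := h
      have hts : (t.toNat : Int) = t := Int.toNat_of_nonneg h0
      have hk : d = (d - t.toNat - 1) + (t.toNat + 1) := by omega
      have h1 : simd (t.toNat + 1) [t] = [6, 8] := by
        have h2 : simd t.toNat [t] = [0] := by
          rw [countdown t.toNat t (Or.inr (le_of_eq hts))]
          congr 1
          omega
        have hstep : simd (t.toNat + 1) [t] = dayA (simd t.toNat [t]) := rfl
        rw [hstep, h2]; rfl
      conv_lhs => rw [hk]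
      rw [simd_add, h1]
      have hsplit : ([6, 8] : List Int) = [6] ++ [8] := rfl
      rw [hsplit, len_append]
      push_cast
      rw [ih (d - t.toNat - 1) (by omega) 6, ih (d - t.toNat - 1) (by omega) 8]

theorem simd_nil (d : Nat) : simd d [] = [] := by
  induction d with
  | zero => rfl
  | succ d ih =>
      have hstep : simd (d + 1) ([] : List Int) = dayA (simd d []) := rfl
      rw [hstep, ih]; rfl

theorem sum_pop (data : List Int) : ∀ acc : Int,
    data.foldl (fun acc t => acc + pop t 80) acc = acc + ((simd 80 data).length : Int) := by
  induction data with
  | nil => intro acc; simp [simd_nil]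
  | cons x xs ih =>
      intro acc
      have hx : (x :: xs) = [x] ++ xs := rfl
      rw [List.foldl_cons, ih, hx, len_append]
      push_cast
      rw [← single_pop 80 x]
      ring

-- ===== VERDICT (by name: the statement is the Claim_ definition above) =====
theorem part_one_spec : Claim_equal_part_one := by
  intro data _
  show part_one data = part_one_alt data
  simp only [part_one, part_one_alt]
  rw [build_eq, List.nil_append, range_sim, sum_pop, zero_add]
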